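-- pv_equiv track=rewrite | github.com/S0YKIM/Algorithm | 프로그래머스/고득점kit/모의고사-(1).py | replace_eng_with_num
-- ===== SOURCE A (Python) =====
-- def replace_eng_with_num(answer) :
--     new = list()
--     for i in answer :
--         if i == 'one' :
--             new.append(1)
--         elif i == 'two' :
--             new.append(2)
--         elif i == 'three' :
--             new.append(3)
--     new.sort()
--     return new
-- ===== SOURCE B (Python) =====
-- def replace_eng_with_num(answer):
--     # counting sort over the fixed domain {'one','two','three'}: tally, then emit in value order
--     return [1] * answer.count('one') + [2] * answer.count('two') + [3] * answer.count('three')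
-- ===== Notes on version B (the rewrite author's own statement) =====
-- stated objective: simpler
-- what changed: Replaces the translate-then-comparison-sort loop by a counting sort: count the three words and emit [1]*c1+[2]*c2+[3]*c3 directly in value order, with no sort call.
import Mathlib
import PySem

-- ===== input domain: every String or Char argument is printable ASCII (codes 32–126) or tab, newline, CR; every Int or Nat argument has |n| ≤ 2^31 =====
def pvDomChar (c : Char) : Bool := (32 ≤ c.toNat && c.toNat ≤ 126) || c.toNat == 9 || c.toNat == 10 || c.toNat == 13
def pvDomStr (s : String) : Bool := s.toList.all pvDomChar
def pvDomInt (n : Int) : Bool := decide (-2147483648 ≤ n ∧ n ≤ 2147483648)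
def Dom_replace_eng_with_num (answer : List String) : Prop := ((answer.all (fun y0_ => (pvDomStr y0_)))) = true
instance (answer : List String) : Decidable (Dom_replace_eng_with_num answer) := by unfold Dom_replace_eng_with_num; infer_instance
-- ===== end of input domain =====

-- B replaces the translate-then-sort loop by a counting sort over the fixed domain {one,two,three} (simpler; no sort call).

-- ===== PORT A =====
def replace_eng_with_num (answer : List String) : List Int :=
  let new := answer.foldl (fun acc i =>
    if i = "one" then acc ++ [(1 : Int)]
    else if i = "two" then acc ++ [(2 : Int)]
    else if i = "three" then acc ++ [(3 : Int)]
    else acc) []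
  PySem.List.sorted new (fun x => x) false

-- ===== PORT B =====
def replace_eng_with_num_alt (answer : List String) : List Int :=
  PySem.List.pyRepeat [(1 : Int)] (PySem.List.count answer "one")
    ++ PySem.List.pyRepeat [(2 : Int)] (PySem.List.count answer "two")
    ++ PySem.List.pyRepeat [(3 : Int)] (PySem.List.count answer "three")

-- ===== PRECONDITION & SPEC =====
def Spec_replace_eng_with_num (answer : List String) (out : List Int) : Prop := out = replace_eng_with_num_alt answer
instance (answer : List String) (out : List Int) : Decidable (Spec_replace_eng_with_num answer out) := by unfold Spec_replace_eng_with_num; infer_instance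

-- ===== CLAIM (what is proved, stated in full; the proofs are below) =====
def Claim_equal_replace_eng_with_num : Prop := ∀ (answer : List String), Dom_replace_eng_with_num answer → Spec_replace_eng_with_num answer (replace_eng_with_num answer)

-- ===== LEMMAS AND PROOFS =====

def pvF (i : String) : List Int :=
  if i = "one" then [1] else if i = "two" then [2] else if i = "three" then [3] else []

theorem pvFoldl_eq_flatMap (l : List String) (acc : List Int) :
    l.foldl (fun acc i =>
      if i = "one" then acc ++ [(1 : Int)]
      else if i = "two" then acc ++ [(2 : Int)]
      else if i = "three" then acc ++ [(3 : Int)]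
      else acc) acc = acc ++ l.flatMap pvF := by
  induction l generalizing acc with
  | nil => simp
  | cons a t ih =>
    simp only [List.foldl_cons, List.flatMap_cons, ih, pvF]
    split_ifs <;> simp

def pvTarget (l : List String) : List Int :=
  List.replicate (l.count "one") 1 ++ List.replicate (l.count "two") 2
    ++ List.replicate (l.count "three") 3

theorem pvPerm (l : List String) : (pvTarget l).Perm (l.flatMap pvF) := by
  induction l with
  | nil => simp [pvTarget]
  | cons a t ih =>
    simp only [pvTarget, List.flatMap_cons, List.count_cons, pvF] at *
    by_cases h1 : a = "one"
    · simp only [h1]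
      simp [List.replicate_succ]
      simpa [List.append_assoc] using ih
    · by_cases h2 : a = "two"
      · simp only [h2] at *
        simp [h1, List.replicate_succ]
        refine List.Perm.trans List.perm_middle ?_
        exact List.Perm.cons 2 (by simpa [List.append_assoc] using ih)
      · by_cases h3 : a = "three"
        · simp only [h3] at *
          simp [h1, h2, List.replicate_succ]
          rw [← List.append_assoc]
          exact (List.perm_middle).trans (ih.cons 3)
        · simpa [h1, h2, h3] using ih

theorem pvRepPW (n : Nat) (x : Int) : (List.replicate n x).Pairwise (· ≤ ·) := by
  induction n with
  | zero => simp
  | succ k ih =>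
    rw [List.replicate_succ]
    refine List.Pairwise.cons ?_ ih
    intro b hb
    rw [List.mem_replicate] at hb
    exact hb.2 ▸ le_refl x

theorem pvPairwise (l : List String) : (pvTarget l).Pairwise (· ≤ ·) := by
  unfold pvTarget
  refine List.pairwise_append.2 ⟨List.pairwise_append.2 ⟨pvRepPW _ _, pvRepPW _ _, ?_⟩, pvRepPW _ _, ?_⟩
  · intro x hx y hy
    rw [List.mem_replicate] at hx hy
    rw [hx.2, hy.2]; norm_num
  · intro x hx y hy
    rw [List.mem_append] at hx
    rw [List.mem_replicate] at hy
    rcases hx with h | h <;> rw [List.mem_replicate] at h <;> rw [h.2, hy.2] <;> norm_num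

-- ===== VERDICT (by name: the statement is the Claim_ definition above) =====
theorem replace_eng_with_num_spec : Claim_equal_replace_eng_with_num := by
  intro answer _
  show _ = _
  unfold replace_eng_with_num replace_eng_with_num_alt
  rw [pvFoldl_eq_flatMap, List.nil_append,
    PySem.List.sorted_id_eq_of_perm_of_pairwise _ _ (pvPerm answer) (pvPairwise answer)]
  simp [PySem.List.pyRepeat_singleton, PySem.List.count_eq, pvTarget]
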